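-- pv_equiv track=rewrite | github.com/evolv3ai/rev-ideas | tools/mcp/elevenlabs_speech/utils/prompting.py | _filter_conflicts
-- ===== SOURCE A (Python) =====
-- from typing import Dict, List, Optional, Tuple
--
-- def _filter_conflicts(tags: List[str]) -> List[str]:
--     """Remove conflicting tags"""
--     conflicts = [
--         (["[whispers]", "[WHISPER]"], ["[SHOUTING]", "[shouts]"]),
--         (["[happy]", "[cheerfully]"], ["[sad]", "[crying]"]),
--         (["[rushed]", "[rapid-fire]"], ["[slowly]", "[deliberately]"]),
--     ]
--
--     filtered = tags.copy()
--     for group1, group2 in conflicts: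
--         has_group1 = any(tag in filtered for tag in group1)
--         has_group2 = any(tag in filtered for tag in group2)
--
--         if has_group1 and has_group2:
--             # Remove group2 if both present
--             for tag in group2:
--                 if tag in filtered:
--                     filtered.remove(tag)
--
--     return filtered
-- ===== SOURCE B (Python) =====
-- def _filter_conflicts(tags):
--     """Remove conflicting tags (two-pass: decide removals, then rebuild)."""
--     conflicts = [
--         (["[whispers]", "[WHISPER]"], ["[SHOUTING]", "[shouts]"]),
--         (["[happy]", "[cheerfully]"], ["[sad]", "[crying]"]),
--         (["[rushed]", "[rapid-fire]"], ["[slowly]", "[deliberately]"]),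
--     ]
--     to_remove = set()
--     for group1, group2 in conflicts:
--         if any(t in tags for t in group1) and any(t in tags for t in group2):
--             to_remove.update(t for t in group2 if t in tags)
--     result = []
--     for tag in tags:
--         if tag in to_remove:
--             to_remove.discard(tag)
--         else:
--             result.append(tag)
--     return result
-- ===== Notes on version B (the rewrite author's own statement) =====
-- stated objective: alternative
-- what changed: A mutates a copy of the list pair-by-pair with repeated list.remove calls whose guards re-read the mutated list; B first builds a removal set from the original tags in one pass over the conflict table, then rebuilds the list in a single pass, skipping exactly the first occurrence of each tag in the set.
import Mathlib
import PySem

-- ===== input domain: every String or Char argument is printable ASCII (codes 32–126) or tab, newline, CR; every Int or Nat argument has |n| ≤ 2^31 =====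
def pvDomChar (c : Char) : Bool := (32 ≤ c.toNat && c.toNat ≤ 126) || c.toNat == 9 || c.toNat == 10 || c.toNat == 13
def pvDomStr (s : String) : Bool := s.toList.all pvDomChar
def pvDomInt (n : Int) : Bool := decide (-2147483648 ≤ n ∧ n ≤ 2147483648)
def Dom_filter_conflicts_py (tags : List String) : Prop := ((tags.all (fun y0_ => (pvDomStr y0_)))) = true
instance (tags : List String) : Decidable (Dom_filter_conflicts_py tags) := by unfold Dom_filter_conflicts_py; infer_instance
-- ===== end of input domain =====

-- B replaces A's per-pair in-place list.remove loop by two passes — build a removal set, then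
-- rebuild the list once skipping each removed tag's first occurrence (objective: alternative).

-- ===== PORT A =====
def pvConflicts : List (List String × List String) :=
  [ (["[whispers]", "[WHISPER]"], ["[SHOUTING]", "[shouts]"]),
    (["[happy]", "[cheerfully]"], ["[sad]", "[crying]"]),
    (["[rushed]", "[rapid-fire]"], ["[slowly]", "[deliberately]"]) ]

def filter_conflicts_py (tags : List String) : List String :=
  pvConflicts.foldl (fun filtered gp =>
    let has_group1 := gp.1.any (fun tag => filtered.contains tag)
    let has_group2 := gp.2.any (fun tag => filtered.contains tag)
    if has_group1 && has_group2 then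
      gp.2.foldl (fun f tag =>
        if f.contains tag then (PySem.List.remove? f tag).getD f else f) filtered
    else filtered) tags

-- ===== PORT B =====
-- the single rebuild pass of Source B: copy each tag, skipping the first occurrence of each tag in the set
def pvSkipFirst (s : PySem.Set String) (xs : List String) : List String :=
  match xs with
  | [] => []
  | x :: r =>
      if PySem.Set.contains s x then pvSkipFirst (PySem.Set.discard s x) r
      else x :: pvSkipFirst s r

def pvToRemove (tags : List String) : PySem.Set String :=
  pvConflicts.foldl (fun s gp =>
    if gp.1.any (fun t => tags.contains t) && gp.2.any (fun t => tags.contains t) then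
      PySem.Set.update s (gp.2.filter (fun t => tags.contains t))
    else s) PySem.Set.empty

def filter_conflicts_py_alt (tags : List String) : List String :=
  pvSkipFirst (pvToRemove tags) tags

-- ===== PRECONDITION & SPEC =====
def Spec_filter_conflicts_py (tags : List String) (out : List String) : Prop := out = filter_conflicts_py_alt tags
instance (tags : List String) (out : List String) : Decidable (Spec_filter_conflicts_py tags out) := by unfold Spec_filter_conflicts_py; infer_instance

-- ===== CLAIM (what is proved, stated in full; the proofs are below) =====
def Claim_equal_filter_conflicts_py : Prop := ∀ (tags : List String), Dom_filter_conflicts_py tags → Spec_filter_conflicts_py tags (filter_conflicts_py tags)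

-- ===== LEMMAS AND PROOFS =====

-- the tags a pair contributes to the removal set, computed from the original list
def pvRem (tags : List String) (gp : List String × List String) : List String :=
  if gp.1.any (fun t => tags.contains t) && gp.2.any (fun t => tags.contains t) then
    gp.2.filter (fun t => tags.contains t)
  else []

theorem pvRem_subset (tags : List String) (gp : List String × List String) :
    ∀ t ∈ pvRem tags gp, t ∈ gp.2 := by
  intro t ht
  unfold pvRem at ht
  split at ht
  · exact (List.mem_filter.mp ht).1
  · simp at ht

theorem pvSkip_cons_mem {S : List String} {x : String} (hx : x ∈ S) (r : List String) :
    pvSkipFirst S (x :: r) = pvSkipFirst (PySem.Set.discard S x) r := by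
  simp [pvSkipFirst, PySem.Set.contains, hx]

theorem pvSkip_cons_not_mem {S : List String} {x : String} (hx : x ∉ S) (r : List String) :
    pvSkipFirst S (x :: r) = x :: pvSkipFirst S r := by
  simp [pvSkipFirst, PySem.Set.contains, hx]

theorem pvSkipFirst_nil (xs : List String) : pvSkipFirst [] xs = xs := by
  induction xs with
  | nil => rfl
  | cons x r ih => rw [pvSkip_cons_not_mem (List.not_mem_nil) r, ih]

theorem pvMem_discard {S : List String} {a x : String} (h : a ∈ PySem.Set.discard S x) :
    a ∈ S := by
  simpa [PySem.Set.discard] using (List.mem_filter.mp h).1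

theorem pvDiscard_append_singleton (S : List String) (x a : String) (hxa : x ≠ a) :
    PySem.Set.discard (S ++ [a]) x = PySem.Set.discard S x ++ [a] := by
  simp [PySem.Set.discard, List.filter_append, hxa.symm]

theorem pvDiscard_of_not_mem (S : List String) (a : String) (ha : a ∉ S) :
    PySem.Set.discard S a = S := by
  unfold PySem.Set.discard
  apply List.filter_eq_self.mpr
  intro y hy
  simp only [ne_eq, Bool.not_eq_true', beq_eq_false_iff_ne]
  exact fun h => ha (h ▸ hy)

theorem pvMem_skipFirst (a : String) (xs : List String) :
    ∀ S : List String, a ∉ S → (a ∈ pvSkipFirst S xs ↔ a ∈ xs) := by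
  induction xs with
  | nil => intro S _; simp [pvSkipFirst]
  | cons x r ih =>
    intro S hS
    by_cases hx : x ∈ S
    · have hax : a ≠ x := fun h => hS (h ▸ hx)
      have hnot : a ∉ PySem.Set.discard S x := fun h => hS (pvMem_discard h)
      rw [pvSkip_cons_mem hx r, ih _ hnot]
      simp [hax]
    · rw [pvSkip_cons_not_mem hx r]
      by_cases hax : a = x
      · simp [hax]
      · simp only [List.mem_cons, hax, false_or]
        exact ih _ hS

theorem pvErase_skipFirst (a : String) (xs : List String) :
    ∀ S : List String, a ∉ S →
    (pvSkipFirst S xs).erase a = pvSkipFirst (S ++ [a]) xs := by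
  induction xs with
  | nil => intro S _; rfl
  | cons x r ih =>
    intro S hS
    by_cases hx : x ∈ S
    · have hxa : x ≠ a := fun h => hS (h ▸ hx)
      have hnot : a ∉ PySem.Set.discard S x := fun h => hS (pvMem_discard h)
      rw [pvSkip_cons_mem hx r, pvSkip_cons_mem (List.mem_append_left _ hx) r,
        pvDiscard_append_singleton S x a hxa]
      exact ih _ hnot
    · by_cases hax : x = a
      · subst hax
        rw [pvSkip_cons_not_mem hx r, List.erase_cons_head,
          pvSkip_cons_mem (List.mem_append_right _ List.mem_cons_self) r,
          pvDiscard_append_singleton' S x hS]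
      · have hx2 : x ∉ S ++ [a] := by simp [hx, hax]
        rw [pvSkip_cons_not_mem hx r, pvSkip_cons_not_mem hx2 r,
          List.erase_cons_tail (by simpa using hax), ih _ hS]
where
  pvDiscard_append_singleton' (S : List String) (x : String) (hS : x ∉ S) :
      PySem.Set.discard (S ++ [x]) x = S := by
    simp only [PySem.Set.discard, List.filter_append]
    rw [show List.filter (fun y => !y == x) [x] = [] by simp, List.append_nil]
    exact pvDiscard_of_not_mem S x hS

theorem pvSkipFirst_append_not_mem (a : String) (xs : List String) (ha : a ∉ xs) :
    ∀ S : List String, pvSkipFirst (S ++ [a]) xs = pvSkipFirst S xs := by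
  induction xs with
  | nil => intro S; rfl
  | cons x r ih =>
    intro S
    have hxa : x ≠ a := fun h => ha (h ▸ List.mem_cons_self)
    have har : a ∉ r := fun h => ha (List.mem_cons_of_mem _ h)
    by_cases hx : x ∈ S
    · rw [pvSkip_cons_mem (List.mem_append_left _ hx) r, pvSkip_cons_mem hx r,
        pvDiscard_append_singleton S x a hxa]
      exact ih har _
    · have hx2 : x ∉ S ++ [a] := by simp [hx, hxa]
      rw [pvSkip_cons_not_mem hx2 r, pvSkip_cons_not_mem hx r, ih har]

-- A's guarded list.remove step is first-occurrence erasure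
theorem pvStepA_inner (f : List String) (t : String) :
    (if f.contains t then (PySem.List.remove? f t).getD f else f) = f.erase t := by
  by_cases ht : t ∈ f
  · rw [if_pos (List.contains_iff_mem.mpr ht), PySem.List.remove?_eq_some_erase f t ht]
    rfl
  · rw [if_neg (fun h => ht (List.contains_iff_mem.mp h)), List.erase_of_not_mem ht]

-- A's inner loop over group2, started from a partially rebuilt list, extends the skip set
theorem pvInner_fold (tags : List String) (g2 : List String) :
    ∀ S : List String, g2.Nodup → (∀ t ∈ g2, t ∉ S) →
    g2.foldl (fun f tag => if f.contains tag then (PySem.List.remove? f tag).getD f else f)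
      (pvSkipFirst S tags)
      = pvSkipFirst (S ++ g2.filter (fun t => tags.contains t)) tags := by
  induction g2 with
  | nil => intro S _ _; simp
  | cons t g2' ih =>
    intro S hnd hd
    have htS : t ∉ S := hd t List.mem_cons_self
    rw [List.foldl_cons, pvStepA_inner, pvErase_skipFirst t tags S htS]
    by_cases htt : t ∈ tags
    · have hd' : ∀ u ∈ g2', u ∉ S ++ [t] := by
        intro u hu
        simp only [List.mem_append, List.mem_singleton]
        rintro (h | h)
        · exact hd u (List.mem_cons_of_mem _ hu) h
        · exact (List.nodup_cons.mp hnd).1 (h ▸ hu)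
      rw [ih (S ++ [t]) (List.nodup_cons.mp hnd).2 hd',
        show List.filter (fun u => tags.contains u) (t :: g2')
          = t :: List.filter (fun u => tags.contains u) g2' by
          simp [htt],
        List.append_assoc, List.singleton_append]
    · rw [pvSkipFirst_append_not_mem t tags htt S,
        ih S (List.nodup_cons.mp hnd).2 (fun u hu => hd u (List.mem_cons_of_mem _ hu)),
        show List.filter (fun u => tags.contains u) (t :: g2')
          = List.filter (fun u => tags.contains u) g2' by
          simp only [List.filter_cons]
          rw [if_neg (fun h => htt (List.contains_iff_mem.mp h))]]

-- the guards A evaluates on its partially rebuilt list equal the guards on the original tags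
theorem pvAny_skipFirst (tags : List String) (g : List String) (S : List String)
    (hd : ∀ t ∈ g, t ∉ S) :
    (g.any fun tag => (pvSkipFirst S tags).contains tag) = g.any fun tag => tags.contains tag := by
  rw [Bool.eq_iff_iff]
  simp only [List.any_eq_true, List.contains_iff_mem]
  constructor
  · rintro ⟨t, ht, hmem⟩
    exact ⟨t, ht, (pvMem_skipFirst t tags S (hd t ht)).mp hmem⟩
  · rintro ⟨t, ht, hmem⟩
    exact ⟨t, ht, (pvMem_skipFirst t tags S (hd t ht)).mpr hmem⟩

-- B's set.update is a plain append when the added tags are fresh and distinct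
theorem pvUpdate_append (l : List String) :
    ∀ s : List String, l.Nodup → (∀ x ∈ l, x ∉ s) → PySem.Set.update s l = s ++ l := by
  induction l with
  | nil => intro s _ _; simp [PySem.Set.update]
  | cons x l' ih =>
    intro s hnd hd
    have hx : PySem.Set.add s x = s ++ [x] := by
      rw [PySem.Set.add, if_neg]
      simp only [PySem.Set.contains]
      exact fun h => hd x List.mem_cons_self (List.contains_iff_mem.mp h)
    have hd' : ∀ y ∈ l', y ∉ s ++ [x] := by
      intro y hy
      simp only [List.mem_append, List.mem_singleton]
      rintro (h | h)
      · exact hd y (List.mem_cons_of_mem _ hy) h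
      · exact (List.nodup_cons.mp hnd).1 (h ▸ hy)
    simp only [PySem.Set.update, List.foldl_cons, hx]
    have h2 := ih (s ++ [x]) (List.nodup_cons.mp hnd).2 hd'
    simp only [PySem.Set.update] at h2
    rw [h2, List.append_assoc, List.singleton_append]

-- main simultaneous induction over the conflict pairs
theorem pvOuter (tags : List String) :
    ∀ (cps : List (List String × List String)) (S : List String),
    (∀ gp ∈ cps, gp.2.Nodup ∧ ∀ t ∈ gp.1 ++ gp.2, t ∉ S) →
    cps.Pairwise (fun p q => ∀ t ∈ q.1 ++ q.2, t ∉ p.2) →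
    (cps.foldl (fun filtered gp =>
        let has_group1 := gp.1.any (fun tag => filtered.contains tag)
        let has_group2 := gp.2.any (fun tag => filtered.contains tag)
        if has_group1 && has_group2 then
          gp.2.foldl (fun f tag =>
            if f.contains tag then (PySem.List.remove? f tag).getD f else f) filtered
        else filtered) (pvSkipFirst S tags)
      = pvSkipFirst (cps.foldl (fun R gp => R ++ pvRem tags gp) S) tags)
    ∧ (cps.foldl (fun s gp =>
        if gp.1.any (fun t => tags.contains t) && gp.2.any (fun t => tags.contains t) then
          PySem.Set.update s (gp.2.filter (fun t => tags.contains t))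
        else s) S
      = cps.foldl (fun R gp => R ++ pvRem tags gp) S) := by
  intro cps
  induction cps with
  | nil => intro S _ _; exact ⟨rfl, rfl⟩
  | cons gp rest ih =>
    intro S hgrp hpw
    obtain ⟨hnd, hdS⟩ := hgrp gp List.mem_cons_self
    have hd1 : ∀ t ∈ gp.1, t ∉ S := fun t ht => hdS t (List.mem_append_left _ ht)
    have hd2 : ∀ t ∈ gp.2, t ∉ S := fun t ht => hdS t (List.mem_append_right _ ht)
    have hg1 := pvAny_skipFirst tags gp.1 S hd1
    have hg2 := pvAny_skipFirst tags gp.2 S hd2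
    have hrest : ∀ q ∈ rest, q.2.Nodup ∧ ∀ t ∈ q.1 ++ q.2, t ∉ S ++ pvRem tags gp := by
      intro q hq
      refine ⟨(hgrp q (List.mem_cons_of_mem _ hq)).1, ?_⟩
      intro t ht
      simp only [List.mem_append]
      rintro (h | h)
      · exact (hgrp q (List.mem_cons_of_mem _ hq)).2 t ht h
      · exact (List.pairwise_cons.mp hpw).1 q hq t ht (pvRem_subset tags gp t h)
    have ihS := ih (S ++ pvRem tags gp) hrest (List.pairwise_cons.mp hpw).2
    by_cases hc : ((gp.1.any fun t => tags.contains t) && gp.2.any fun t => tags.contains t) = true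
    · have hrem : pvRem tags gp = gp.2.filter (fun t => tags.contains t) := by
        unfold pvRem; rw [if_pos hc]
      constructor
      · -- A side, both groups present
        simp only [List.foldl_cons]
        rw [show (if ((gp.1.any fun tag => (pvSkipFirst S tags).contains tag) &&
              gp.2.any fun tag => (pvSkipFirst S tags).contains tag) = true then
              gp.2.foldl (fun f tag =>
                if f.contains tag then (PySem.List.remove? f tag).getD f else f)
                (pvSkipFirst S tags)
            else pvSkipFirst S tags) = pvSkipFirst (S ++ pvRem tags gp) tags by
          rw [hg1, hg2, if_pos hc, pvInner_fold tags gp.2 S hnd hd2, hrem]]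
        exact ihS.1
      · -- B side, both groups present
        simp only [List.foldl_cons]
        rw [if_pos hc,
          pvUpdate_append _ S (hnd.filter _)
            (fun x hx => hd2 x (List.mem_filter.mp hx).1),
          ← hrem]
        exact ihS.2
    · have hrem : pvRem tags gp = [] := by
        unfold pvRem; rw [if_neg (by simpa using hc)]
      rw [hrem, List.append_nil] at ihS
      constructor
      · -- A side, guard false
        simp only [List.foldl_cons]
        rw [show (if ((gp.1.any fun tag => (pvSkipFirst S tags).contains tag) &&
              gp.2.any fun tag => (pvSkipFirst S tags).contains tag) = true then
              gp.2.foldl (fun f tag =>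
                if f.contains tag then (PySem.List.remove? f tag).getD f else f)
                (pvSkipFirst S tags)
            else pvSkipFirst S tags) = pvSkipFirst S tags by
          rw [hg1, hg2, if_neg (by simpa using hc)], hrem, List.append_nil]
        exact ihS.1
      · -- B side, guard false
        simp only [List.foldl_cons]
        rw [if_neg (by simpa using hc), hrem, List.append_nil]
        exact ihS.2

-- ===== VERDICT (by name: the statement is the Claim_ definition above) =====
theorem filter_conflicts_py_spec : Claim_equal_filter_conflicts_py := by
  intro tags _
  unfold Spec_filter_conflicts_py filter_conflicts_py filter_conflicts_py_alt pvToRemove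
  have h := pvOuter tags pvConflicts []
    (by intro gp hgp
        refine ⟨?_, by simp⟩
        fin_cases hgp <;> decide)
    (by decide)
  rw [pvSkipFirst_nil tags] at h
  rw [h.1, show PySem.Set.empty = ([] : List String) from rfl, h.2]
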